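-- pv_equiv track=rewrite | github.com/SuchithSridhar/Compact-DNA-Data-Structures | bml-bloom-kmer/code/plot/process_data.py | get_mems_info
-- ===== SOURCE A (Python) =====
-- def get_mems_info(output: str) -> tuple[str | None, str | None]:
--     bw_steps = None
--     time_taken = None
--
--     for line in output.split("\n"):
--         if "backward" in line:
--             bw_steps = line.split(": ")[1]
--         elif "Time" in line:
--             time_taken = (line.split(": ")[1]).split(" m")[0]
--
--     return (bw_steps, time_taken)
-- ===== SOURCE B (Python) =====
-- def get_mems_info(output: str) -> tuple[str | None, str | None]:
--     lines = output.split("\n")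
--     bw = [l for l in lines if "backward" in l]
--     tm = [l for l in lines if "backward" not in l and "Time" in l]
--     bw_steps = bw[-1].split(": ")[1] if bw else None
--     time_taken = tm[-1].split(": ")[1].split(" m")[0] if tm else None
--     return (bw_steps, time_taken)
-- ===== Notes on version B (the rewrite author's own statement) =====
-- stated objective: alternative
-- what changed: Replaced the single stateful pass that overwrites two accumulator variables by two independent filter passes (backward-lines, and Time-lines without backward) that each take the last match and parse only that line.
import Mathlib
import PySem

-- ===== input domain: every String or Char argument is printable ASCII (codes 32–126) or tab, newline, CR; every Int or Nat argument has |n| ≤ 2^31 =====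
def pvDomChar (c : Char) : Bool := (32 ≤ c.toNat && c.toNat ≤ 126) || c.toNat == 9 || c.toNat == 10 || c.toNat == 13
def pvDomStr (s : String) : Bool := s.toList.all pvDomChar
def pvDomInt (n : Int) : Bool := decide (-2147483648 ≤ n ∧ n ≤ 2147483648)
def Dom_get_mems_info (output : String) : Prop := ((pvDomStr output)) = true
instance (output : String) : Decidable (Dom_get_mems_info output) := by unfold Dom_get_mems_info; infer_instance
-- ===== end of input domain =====

-- B replaces A's single stateful scan by two independent filter-then-take-last passes; same cost, alternative decomposition.
-- note: split? sep is the non-empty literal "\n" / ": " / " m", so it is never none; .getD [] only discharges the Option.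
-- ===== PORT A =====
def get_mems_info (output : String) : Option String × Option String :=
  ((PySem.Str.split? output "\n").getD []).foldl
    (fun st line =>
      if PySem.Str.isIn "backward" line then
        ((PySem.Str.split? line ": ").bind (fun ps => PySem.List.pyGet? ps 1), st.2)
      else if PySem.Str.isIn "Time" line then
        (st.1, ((PySem.Str.split? line ": ").bind (fun ps => PySem.List.pyGet? ps 1)).bind
                 (fun s => (PySem.Str.split? s " m").bind (fun ps => PySem.List.pyGet? ps 0)))
      else st)
    (none, none)

-- ===== PORT B =====
def get_mems_info_alt (output : String) : Option String × Option String :=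
  let lines := (PySem.Str.split? output "\n").getD []
  let bw := lines.filter (fun l => PySem.Str.isIn "backward" l)
  let tm := lines.filter (fun l => !PySem.Str.isIn "backward" l && PySem.Str.isIn "Time" l)
  ((match bw.getLast? with
    | some l => (PySem.Str.split? l ": ").bind (fun ps => PySem.List.pyGet? ps 1)
    | none => none),
   (match tm.getLast? with
    | some l => ((PySem.Str.split? l ": ").bind (fun ps => PySem.List.pyGet? ps 1)).bind
                  (fun s => (PySem.Str.split? s " m").bind (fun ps => PySem.List.pyGet? ps 0))
    | none => none))

-- ===== PRECONDITION & SPEC =====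
-- Pre_ excludes exactly the inputs on which Python A raises IndexError:
-- a line containing "backward" (or, failing that, "Time") without the separator ": ".
def Pre_get_mems_info (output : String) : Prop :=
  ∀ line ∈ (PySem.Str.split? output "\n").getD [],
    (PySem.Str.isIn "backward" line || PySem.Str.isIn "Time" line) = true →
      2 ≤ ((PySem.Str.split? line ": ").getD []).length
instance (output : String) : Decidable (Pre_get_mems_info output) := by
  unfold Pre_get_mems_info; infer_instance
def pvWitness_get_mems_info : String := "backward steps: 7\nTime taken: 3 ms"

def Spec_get_mems_info (output : String) (out : Option String × Option String) : Prop := out = get_mems_info_alt output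
instance (output : String) (out : Option String × Option String) : Decidable (Spec_get_mems_info output out) := by unfold Spec_get_mems_info; infer_instance

-- ===== CLAIM (what is proved, stated in full; the proofs are below) =====
def Claim_equal_get_mems_info : Prop := ∀ (output : String), Dom_get_mems_info output → Pre_get_mems_info output → Spec_get_mems_info output (get_mems_info output)

-- ===== LEMMAS AND PROOFS =====
-- A's fold keeps, in each component, the parse of the LAST line matched by the
-- corresponding branch (the elif firing only when the first test fails).
theorem foldl_two_track (p q : String → Bool) (f g : String → Option String) :
    ∀ (lines : List String) (b t : Option String),
      lines.foldl
        (fun st line => if p line then (f line, st.2)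
                        else if q line then (st.1, g line) else st) (b, t)
      = ((match (lines.filter p).getLast? with
          | some l => f l | none => b),
         (match (lines.filter (fun l => !p l && q l)).getLast? with
          | some l => g l | none => t)) := by
  intro lines
  induction lines with
  | nil => intro b t; rfl
  | cons x xs ih =>
    intro b t
    by_cases hp : p x
    · simp only [List.foldl_cons, hp, if_true, ih, List.filter_cons, Bool.not_true,
        Bool.false_and, List.getLast?_cons]
      cases (xs.filter p).getLast? <;> simp
    · by_cases hq : q x
      · simp only [List.foldl_cons, hp, hq, if_true, ih, List.filter_cons,
          Bool.not_false, Bool.true_and, List.getLast?_cons]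
        cases (xs.filter (fun l => !p l && q l)).getLast? <;> simp
      · simp [List.foldl_cons, hp, hq, ih]

-- ===== VERDICT (by name: the statement is the Claim_ definition above) =====
theorem get_mems_info_spec : Claim_equal_get_mems_info := by
  intro output _ _
  unfold Spec_get_mems_info get_mems_info get_mems_info_alt
  exact foldl_two_track (fun l => PySem.Str.isIn "backward" l)
    (fun l => PySem.Str.isIn "Time" l)
    (fun line => (PySem.Str.split? line ": ").bind (fun ps => PySem.List.pyGet? ps 1))
    (fun line => ((PySem.Str.split? line ": ").bind (fun ps => PySem.List.pyGet? ps 1)).bind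
      (fun s => (PySem.Str.split? s " m").bind (fun ps => PySem.List.pyGet? ps 0)))
    ((PySem.Str.split? output "\n").getD []) none none
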